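-- pv_equiv track=rewrite | github.com/svendvn/ImmediateAncestry | ImmediateAncestry/scripts/rethin.py | rethin_recomb_chrom
-- ===== SOURCE A (Python) =====
-- def rethin_recomb_chrom(rec_seq, thin_coef):
--     new_chroms=[]
--     for i in range(thin_coef):
--         j=i
--         chrom=[]
--         while j<len(rec_seq)-thin_coef+1:
--             chrom.append(sum(rec_seq[j:j+thin_coef]))
--             j+=thin_coef
--         new_chroms.append(chrom)
--     return new_chroms
-- ===== SOURCE B (Python) =====
-- def rethin_recomb_chrom(rec_seq, thin_coef):
--     # prefix-sum array: each window sum in O(1) instead of re-summing a slice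
--     prefix = [0]
--     acc = 0
--     for v in rec_seq:
--         acc += v
--         prefix.append(acc)
--     stop = len(rec_seq) - thin_coef + 1
--     return [[prefix[j + thin_coef] - prefix[j] for j in range(i, stop, thin_coef)]
--             for i in range(thin_coef)]
-- ===== Notes on version B (the rewrite author's own statement) =====
-- stated objective: faster
-- what changed: Replaces the per-window slice-and-sum (each window re-summed in O(thin_coef)) with a prefix-sum array built once, so each window sum is a single O(1) subtraction inside range comprehensions.
import Mathlib
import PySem

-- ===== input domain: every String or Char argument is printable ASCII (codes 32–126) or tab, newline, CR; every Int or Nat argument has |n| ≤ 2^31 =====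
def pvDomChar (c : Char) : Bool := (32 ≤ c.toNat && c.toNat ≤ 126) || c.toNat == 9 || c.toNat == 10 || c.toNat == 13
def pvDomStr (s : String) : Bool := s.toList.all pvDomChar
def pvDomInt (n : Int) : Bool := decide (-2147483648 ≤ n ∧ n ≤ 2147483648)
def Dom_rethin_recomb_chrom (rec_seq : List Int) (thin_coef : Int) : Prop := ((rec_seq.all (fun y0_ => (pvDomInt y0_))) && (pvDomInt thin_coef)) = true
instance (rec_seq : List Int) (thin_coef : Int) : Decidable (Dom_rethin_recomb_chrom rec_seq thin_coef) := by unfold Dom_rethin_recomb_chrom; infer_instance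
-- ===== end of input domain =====

-- B replaces A's per-window slice-and-sum with a prefix-sum array, making each window sum O(1) (measured asymptotically faster).

-- ===== PORT A =====
-- the inner 'while j < len(rec_seq)-thin_coef+1: chrom.append(sum(rec_seq[j:j+thin_coef])); j+=thin_coef'
-- (fuel only makes the recursion total; rec_seq.length+1 iterations always suffice since j strictly grows)
def pvWhileA (rec_seq : List Int) (thin : Int) : Int → Nat → List Int
  | _, 0 => []
  | j, fuel+1 =>
    if j < (rec_seq.length : Int) - thin + 1 then
      (PySem.List.slice rec_seq (some j) (some (j + thin))).sum ::
        pvWhileA rec_seq thin (j + thin) fuel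
    else []

def rethin_recomb_chrom (rec_seq : List Int) (thin_coef : Int) : List (List Int) :=
  (PySem.List.pyRange 0 thin_coef 1).foldl
    (fun acc i => acc ++ [pvWhileA rec_seq thin_coef i (rec_seq.length + 1)])
    []

-- ===== PORT B =====
-- 'prefix = [0]; acc = 0; for v in rec_seq: acc += v; prefix.append(acc)' as a running-sum scan
def pvPrefixB : Int → List Int → List Int
  | acc, [] => [acc]
  | acc, v :: rest => acc :: pvPrefixB (acc + v) rest

-- prefix[j] is always in range where it is read (proved below), so pyGetD is exact here
def rethin_recomb_chrom_alt (rec_seq : List Int) (thin_coef : Int) : List (List Int) :=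
  let p := pvPrefixB 0 rec_seq
  (PySem.List.pyRange 0 thin_coef 1).map (fun i =>
    (PySem.List.pyRange i ((rec_seq.length : Int) - thin_coef + 1) thin_coef).map
      (fun j => PySem.List.pyGetD p (j + thin_coef) 0 - PySem.List.pyGetD p j 0))

-- ===== PRECONDITION & SPEC =====
def Spec_rethin_recomb_chrom (rec_seq : List Int) (thin_coef : Int) (out : List (List Int)) : Prop := out = rethin_recomb_chrom_alt rec_seq thin_coef
instance (rec_seq : List Int) (thin_coef : Int) (out : List (List Int)) : Decidable (Spec_rethin_recomb_chrom rec_seq thin_coef out) := by unfold Spec_rethin_recomb_chrom; infer_instance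

-- ===== CLAIM (what is proved, stated in full; the proofs are below) =====
def Claim_equal_rethin_recomb_chrom : Prop := ∀ (rec_seq : List Int) (thin_coef : Int), Dom_rethin_recomb_chrom rec_seq thin_coef → Spec_rethin_recomb_chrom rec_seq thin_coef (rethin_recomb_chrom rec_seq thin_coef)

-- ===== LEMMAS AND PROOFS =====

-- range(a, b, s) with positive step s is empty when b ≤ a
lemma pvRange_pos_nil (a b s : Int) (hs : 0 < s) (h : b ≤ a) :
    PySem.List.pyRange a b s = [] := by
  rw [PySem.List.pyRange_of_pos a b hs]
  simp [show ¬ a < b by omega]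

-- cons form of range(a, b, s) for positive step s
lemma pvRange_pos_cons (a b s : Int) (hs : 0 < s) (h : a < b) :
    PySem.List.pyRange a b s = a :: PySem.List.pyRange (a + s) b s := by
  rw [PySem.List.pyRange_of_pos a b hs, PySem.List.pyRange_of_pos (a + s) b hs]
  have hdiv : (b - a + s - 1) / s = (b - a - 1) / s + 1 := by
    have : b - a + s - 1 = (b - a - 1) + 1 * s := by ring
    rw [this, Int.add_mul_ediv_right _ _ (by omega : s ≠ 0)]
  by_cases hb : a + s < b
  · have hN' : (b - (a + s) + s - 1) / s = (b - a - 1) / s := by ring_nf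
    have hNpos : 0 ≤ (b - a - 1) / s := Int.ediv_nonneg (by omega) (by omega)
    have hN : ((b - a + s - 1) / s).toNat = ((b - (a + s) + s - 1) / s).toNat + 1 := by
      rw [hdiv, hN']; omega
    rw [if_pos h, if_pos hb, hN, List.range_succ_eq_map, List.map_cons, List.map_map]
    refine congrArg₂ List.cons (by simp) ?_
    apply List.map_congr_left
    intro k _
    simp only [Function.comp, Nat.succ_eq_add_one]
    push_cast
    ring
  · have h0 : (b - a - 1) / s = 0 := Int.ediv_eq_zero_of_lt (by omega) (by omega)
    have hN : ((b - a + s - 1) / s).toNat = 1 := by rw [hdiv, h0]; rfl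
    rw [if_pos h, if_neg (by omega : ¬ a + s < b), hN]
    simp

-- the prefix-sum list: its k-th entry is a plus the sum of the first k elements
lemma pvPrefixB_getD (l : List Int) : ∀ (a : Int) (k : Nat), k ≤ l.length →
    (pvPrefixB a l).getD k 0 = a + (l.take k).sum := by
  induction l with
  | nil =>
    intro a k hk
    have hk0 : k = 0 := by simpa using hk
    subst hk0
    simp [pvPrefixB]
  | cons v rest ih =>
    intro a k hk
    cases k with
    | zero => simp [pvPrefixB]
    | succ k =>
      simp only [pvPrefixB, List.getD_cons_succ, List.take_succ_cons, List.sum_cons]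
      rw [ih (a + v) k (by simpa using hk)]
      ring

-- pyGetD at a nonnegative Int index is getD at its toNat
lemma pvGetD_toNat (xs : List Int) (i : Int) (d : Int) (hi : 0 ≤ i) :
    PySem.List.pyGetD xs i d = xs.getD i.toNat d := by
  conv_lhs => rw [← Int.toNat_of_nonneg hi]
  rw [PySem.List.pyGetD_natCast]

-- a window's slice sum equals the difference of two prefix sums
lemma pvWindowSum (l : List Int) (j s : Int) (hj : 0 ≤ j) (hs : 0 ≤ s)
    (hend : j + s ≤ (l.length : Int)) :
    (PySem.List.slice l (some j) (some (j + s))).sum =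
      PySem.List.pyGetD (pvPrefixB 0 l) (j + s) 0 - PySem.List.pyGetD (pvPrefixB 0 l) j 0 := by
  rw [PySem.List.slice_toNat l hj (by omega),
      pvGetD_toNat (pvPrefixB 0 l) (j + s) 0 (by omega),
      pvGetD_toNat (pvPrefixB 0 l) j 0 hj,
      pvPrefixB_getD l 0 j.toNat (by omega), pvPrefixB_getD l 0 (j + s).toNat (by omega)]
  have hsplit : (j + s).toNat = j.toNat + ((j + s).toNat - j.toNat) := by omega
  conv_rhs => rw [hsplit]
  rw [List.take_add, List.sum_append]
  ring

-- A's while loop equals B's mapped range, given enough fuel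
lemma pvWhileA_eq (l : List Int) (s : Int) (hs : 0 < s) :
    ∀ (fuel : Nat) (j : Int), 0 ≤ j → (l.length : Int) - s + 1 - j ≤ (fuel : Int) →
    pvWhileA l s j fuel =
      (PySem.List.pyRange j ((l.length : Int) - s + 1) s).map
        (fun j => PySem.List.pyGetD (pvPrefixB 0 l) (j + s) 0 -
                  PySem.List.pyGetD (pvPrefixB 0 l) j 0) := by
  intro fuel
  induction fuel with
  | zero =>
    intro j hj hfuel
    rw [pvRange_pos_nil _ _ _ hs (by push_cast at hfuel; omega)]
    rfl
  | succ fuel ih =>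
    intro j hj hfuel
    by_cases h : j < (l.length : Int) - s + 1
    · rw [pvRange_pos_cons _ _ _ hs h, List.map_cons]
      simp only [pvWhileA, if_pos h]
      rw [pvWindowSum l j s hj (by omega) (by omega),
          ih (j + s) (by omega) (by push_cast at hfuel ⊢; omega)]
    · rw [pvRange_pos_nil _ _ _ hs (by omega)]
      simp [pvWhileA, h]

-- ===== VERDICT (by name: the statement is the Claim_ definition above) =====
theorem rethin_recomb_chrom_spec : Claim_equal_rethin_recomb_chrom := by
  intro rec_seq thin_coef _hdom
  unfold Spec_rethin_recomb_chrom rethin_recomb_chrom rethin_recomb_chrom_alt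
  rw [PySem.List.foldl_append_singleton_eq_map, List.nil_append]
  apply List.map_congr_left
  intro i hi
  have hmem := PySem.List.mem_pyRange_one.mp hi
  exact pvWhileA_eq rec_seq thin_coef (by omega) (rec_seq.length + 1) i (by omega)
    (by push_cast; omega)
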